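-- pv_equiv track=rewrite | github.com/cobaltt7/python-exercises | 8 list/226-235.py | two_three_three
-- ===== SOURCE A (Python) =====
-- from typing import Any, Callable
-- from math import floor, ceil
--
-- def two_three_three(data: list[Any], count: int):
--     """Write a Python program to chunk a given list into n smaller lists."""
--     size = ceil(len(data) / count)
--     index = 0
--     output = []
--     while index < len(data):
--         output.append(data[index : index + size])
--         index += size
--     return output
-- ===== SOURCE B (Python) =====
-- from math import ceil
--
-- def two_three_three(data, count):
--     """Chunk data into count sublists: one element-wise pass keeping a current chunk."""
--     size = ceil(len(data) / count)
--     output = []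
--     for i, item in enumerate(data):
--         if i % size == 0:
--             output.append([])
--         output[-1].append(item)
--     return output
-- ===== Notes on version B (the rewrite author's own statement) =====
-- stated objective: alternative
-- what changed: B replaces A's index-arithmetic while-loop over slices by a single element-wise pass with enumerate that opens a new sublist whenever the index is a multiple of the chunk size and appends each element to the current (last) sublist.
import Mathlib
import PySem

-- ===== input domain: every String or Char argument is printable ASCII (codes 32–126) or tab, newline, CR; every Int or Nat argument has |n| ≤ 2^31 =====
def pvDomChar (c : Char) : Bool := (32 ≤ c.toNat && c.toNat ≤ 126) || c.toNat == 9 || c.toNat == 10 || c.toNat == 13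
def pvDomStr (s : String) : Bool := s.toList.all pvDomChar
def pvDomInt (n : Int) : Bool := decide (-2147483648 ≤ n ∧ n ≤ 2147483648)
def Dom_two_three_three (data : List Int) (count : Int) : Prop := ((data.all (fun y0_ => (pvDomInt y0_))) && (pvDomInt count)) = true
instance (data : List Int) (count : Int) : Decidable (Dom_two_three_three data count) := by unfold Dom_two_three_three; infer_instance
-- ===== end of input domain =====

-- B chunks by a single element-wise pass maintaining the current chunk, instead of A's
-- index-slicing while-loop; objective: alternative decomposition, same O(n) cost.

-- ===== PORT A =====
-- ceil(len(data) / count): exact integer ceiling -((-a)//b); exact for |a|,|b| ≤ 2^31 < 2^53,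
-- where Python's float division cannot round across an integer boundary.
-- while loop with fuel data.length + 1 (enough: index grows by size ≥ 1 per kept iteration on Pre_).
def twoLoopA (data : List Int) (size : Int) : Nat → Int → List (List Int)
  | 0, _ => []
  | fuel + 1, index =>
    if index < (data.length : Int) then
      PySem.List.slice data (some index) (some (index + size)) ::
        twoLoopA data size fuel (index + size)
    else []

def two_three_three (data : List Int) (count : Int) : List (List Int) :=
  let size : Int := -(PySem.Int.floordiv (-(data.length : Int)) count)
  twoLoopA data size (data.length + 1) 0

-- ===== PORT B =====
-- one fold step: 'if i % size == 0: output.append([])' then 'output[-1].append(item)'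
-- (output[-1] ported with getLastD; in B the list is never empty when it is read).
def twoStepB (size : Int) (acc : List (List Int)) (p : Int × Int) : List (List Int) :=
  let out := if PySem.Int.mod p.1 size == 0 then acc ++ [[]] else acc
  out.dropLast ++ [out.getLastD [] ++ [p.2]]

def two_three_three_alt (data : List Int) (count : Int) : List (List Int) :=
  let size : Int := -(PySem.Int.floordiv (-(data.length : Int)) count)
  (PySem.List.enumerate data 0).foldl (twoStepB size) []

-- ===== PRECONDITION & SPEC =====
-- Pre_ excludes count = 0 (A raises ZeroDivisionError) and count < 0 with nonempty data
-- (size ≤ 0, so A's while loop never terminates).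
def Pre_two_three_three (data : List Int) (count : Int) : Prop :=
  0 < count ∨ (data = [] ∧ count ≠ 0)
instance (data : List Int) (count : Int) : Decidable (Pre_two_three_three data count) := by
  unfold Pre_two_three_three; infer_instance

def pvWitness_two_three_three : List Int × Int := ([1, 2, 3, 4, 5], 2)

def Spec_two_three_three (data : List Int) (count : Int) (out : List (List Int)) : Prop := out = two_three_three_alt data count
instance (data : List Int) (count : Int) (out : List (List Int)) : Decidable (Spec_two_three_three data count out) := by unfold Spec_two_three_three; infer_instance

-- ===== CLAIM (what is proved, stated in full; the proofs are below) =====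
def Claim_equal_two_three_three : Prop := ∀ (data : List Int) (count : Int), Dom_two_three_three data count → Pre_two_three_three data count → Spec_two_three_three data count (two_three_three data count)

-- ===== LEMMAS AND PROOFS =====

-- canonical chunking with chunk size s+1 (strictly positive, so it terminates)
def chunks1 (s : Nat) : List Int → List (List Int)
  | [] => []
  | x :: xs => (x :: xs).take (s + 1) :: chunks1 s ((x :: xs).drop (s + 1))
  termination_by l => l.length
  decreasing_by simp

theorem chunks1_nil (s : Nat) : chunks1 s [] = [] := by
  rw [chunks1.eq_def]

theorem chunks1_cons (s : Nat) (x : Int) (xs : List Int) :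
    chunks1 s (x :: xs) = (x :: xs).take (s + 1) :: chunks1 s ((x :: xs).drop (s + 1)) := by
  rw [chunks1.eq_def]

theorem twoLoopA_eq_chunks1 (data : List Int) (s : Nat) :
    ∀ (fuel : Nat) (j : Nat), data.length - j < fuel →
      twoLoopA data ((s : Int) + 1) fuel (j : Int) = chunks1 s (data.drop j) := by
  intro fuel
  induction fuel with
  | zero => intro j h; omega
  | succ fuel ih =>
    intro j h
    by_cases hj : j < data.length
    · obtain ⟨x, xs, hx⟩ : ∃ x xs, data.drop j = x :: xs := by
        cases hd : data.drop j with
        | nil => rw [List.drop_eq_nil_iff] at hd; omega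
        | cons a l => exact ⟨a, l, rfl⟩
      rw [twoLoopA, if_pos (by exact_mod_cast hj)]
      have hslice : PySem.List.slice data (some (j : Int)) (some ((j : Int) + ((s : Int) + 1)))
          = (data.drop j).take (s + 1) := by
        have := PySem.List.slice_natCast_add data j (s + 1)
        rw [← this]; norm_num
      have hidx : (j : Int) + ((s : Int) + 1) = ((j + (s + 1) : Nat) : Int) := by push_cast; ring
      rw [hslice, hidx, ih (j + (s + 1)) (by omega)]
      rw [hx, chunks1_cons, ← hx, List.drop_drop]
    · rw [twoLoopA, if_neg (by exact_mod_cast hj), List.drop_eq_nil_of_le (by omega), chunks1_nil]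

-- filling the current (last) chunk: while i % size ≠ 0 the step only appends to the last sublist
theorem foldl_fill (s : Nat) :
    ∀ (pairs : List (Int × Int)) (done : List (List Int)) (cur : List Int),
      (∀ p ∈ pairs, (PySem.Int.mod p.1 ((s : Int) + 1) == 0) = false) →
      pairs.foldl (twoStepB ((s : Int) + 1)) (done ++ [cur]) = done ++ [cur ++ pairs.map (·.2)] := by
  intro pairs
  induction pairs with
  | nil => intro done cur _; simp
  | cons p rest ih =>
    intro done cur hmod
    rw [List.foldl_cons]
    have hstep : twoStepB ((s : Int) + 1) (done ++ [cur]) p = done ++ [cur ++ [p.2]] := by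
      unfold twoStepB
      rw [hmod p (by simp)]
      simp
    rw [hstep, ih done (cur ++ [p.2]) (fun q hq => hmod q (by simp [hq]))]
    simp

theorem foldl_enum_eq_chunks1 (s : Nat) :
    ∀ (l : List Int) (j : Nat) (acc : List (List Int)),
      ((s : Int) + 1) ∣ (j : Int) →
      (PySem.List.enumerate l (j : Int)).foldl (twoStepB ((s : Int) + 1)) acc
        = acc ++ chunks1 s l := by
  intro l
  induction l using chunks1.induct s with
  | case1 =>
    intro j acc _
    simp [PySem.List.enumerate_nil, chunks1_nil]
  | case2 x xs ih =>
    intro j acc hdvd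
    obtain ⟨q, hq⟩ := hdvd
    have htake : (x :: xs).take (s + 1) = x :: xs.take s := by simp
    have henum : PySem.List.enumerate (x :: xs) (j : Int)
        = PySem.List.enumerate ((x :: xs).take (s + 1)) (j : Int)
          ++ PySem.List.enumerate ((x :: xs).drop (s + 1))
              ((j : Int) + (((x :: xs).take (s + 1)).length : Int)) := by
      conv_lhs => rw [← List.take_append_drop (s + 1) (x :: xs)]
      rw [PySem.List.enumerate_append]
    rw [henum, List.foldl_append, htake, PySem.List.enumerate_cons, List.foldl_cons]
    -- first element opens a new chunk
    have hmod0 : PySem.Int.mod (j : Int) ((s : Int) + 1) = 0 :=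
      (PySem.Int.mod_eq_zero_iff_dvd _ _).mpr ⟨q, hq⟩
    have hstep0 : twoStepB ((s : Int) + 1) acc ((j : Int), x) = acc ++ [[x]] := by
      unfold twoStepB
      rw [hmod0]
      simp
    rw [hstep0]
    -- the other elements of the first chunk have nonzero index mod size
    have hfill := foldl_fill s (PySem.List.enumerate (xs.take s) ((j : Int) + 1)) acc [x]
      (by
        intro p hp
        rw [PySem.List.mem_enumerate_iff] at hp
        obtain ⟨k, hk, hpk⟩ := hp
        have hks : k < s := by
          have := hk; simp [List.length_take] at this; omega
        subst hpk
        simp only [beq_eq_false_iff_ne, ne_eq]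
        rw [PySem.Int.mod_eq_emod_of_pos (by positivity), hq]
        have hrw : ((s : Int) + 1) * q + 1 + (k : Int)
            = (1 + (k : Int)) + (q * ((s : Int) + 1)) := by ring
        rw [hrw, Int.add_mul_emod_self_right,
            Int.emod_eq_of_lt (by positivity) (by omega)]
        omega)
    rw [hfill, PySem.List.map_snd_enumerate]
    have hcur : ([x] ++ xs.take s : List Int) = (x :: xs).take (s + 1) := by simp
    rw [hcur]
    -- remaining chunks
    by_cases hle : s + 1 ≤ (x :: xs).length
    · have hle' : s ≤ xs.length := by simpa using hle
      have hlenN : (x :: List.take s xs).length = s + 1 := by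
        simp [List.length_take]; omega
      have hcast : (j : Int) + ((x :: List.take s xs).length : Int)
          = ((j + (s + 1) : Nat) : Int) := by rw [hlenN]; push_cast; ring
      rw [hcast, ih (j + (s + 1)) (acc ++ [(x :: xs).take (s + 1)])
        (by push_cast; exact ⟨q + 1, by rw [hq]; push_cast; ring⟩)]
      rw [chunks1_cons]
      simp
    · have hdrop : (x :: xs).drop (s + 1) = [] := List.drop_eq_nil_of_le (by omega)
      rw [hdrop, PySem.List.enumerate_nil, List.foldl_nil, chunks1_cons, hdrop, chunks1_nil]

theorem size_pos (data : List Int) (count : Int) (hc : 0 < count) (hd : data ≠ []) :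
    0 < -(PySem.Int.floordiv (-(data.length : Int)) count) := by
  have hn : 0 < (data.length : Int) := by
    have := List.length_pos_iff.mpr hd
    exact_mod_cast this
  have h2 : PySem.Int.floordiv (-(data.length : Int)) count < 0 :=
    (PySem.Int.floordiv_lt_iff_lt_mul hc).mpr (by rw [zero_mul]; omega)
  omega

-- ===== VERDICT (by name: the statement is the Claim_ definition above) =====
theorem two_three_three_spec : Claim_equal_two_three_three := by
  intro data count _ hpre
  unfold Spec_two_three_three two_three_three two_three_three_alt
  by_cases hd : data = []
  · subst hd
    simp [twoLoopA, PySem.List.enumerate_nil]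
  · have hc : 0 < count := by
      rcases hpre with h | ⟨h, _⟩
      · exact h
      · exact absurd h hd
    obtain ⟨s, hs⟩ : ∃ s : Nat, -(PySem.Int.floordiv (-(data.length : Int)) count) = (s : Int) + 1 := by
      have := size_pos data count hc hd
      exact ⟨(-(PySem.Int.floordiv (-(data.length : Int)) count) - 1).toNat, by omega⟩
    rw [hs]
    have hA := twoLoopA_eq_chunks1 data s (data.length + 1) 0 (by omega)
    have hB := foldl_enum_eq_chunks1 s data 0 [] ⟨0, by ring⟩
    simp only [Nat.cast_zero] at hA hB
    rw [hA, hB]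
    simp
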